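-- pv_equiv track=rewrite | github.com/miliar/Code_Jam_Webscraper | Solutions_in_python/Problem_201/bathroomStalls.py | pickStall
-- ===== SOURCE A (Python) =====
-- def myMax(l, func= lambda x: x):
--     iterator = iter(l)
--     currMax = next(iterator)
--     while True:
--         try:
--             nxt = next(iterator)
--             if func(currMax) < func(nxt):
--                 currMax = nxt
--         except StopIteration:
--             break
--
--     return filter(lambda x: func(x) == func(currMax), l)
--
-- def pickStall(stalls):
--     stallInfo = [(i, getSides(stalls, i)) for i in range(len(stalls))]
--     mins = list(myMax(stallInfo, lambda x: min(*x[1])))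
--     if len(mins) == 1:
--         return mins[0]
--     else:
--         maxs = list(myMax(mins, lambda x: max(*x[1])))
--         return maxs[0]
--
-- def getSides(stalls, idx):
--     if stalls[idx]:
--         return (0, 0)
--     currIdx = idx - 1
--     currCount = 0
--     while not stalls[currIdx]:
--         currCount += 1
--         currIdx -= 1
--     left = currCount
--
--     currIdx = idx + 1
--     currCount = 0
--     while not stalls[currIdx]:
--         currCount += 1
--         currIdx += 1
--     right = currCount
--
--     return (left, right)
-- ===== SOURCE B (Python) =====
-- def pickStall(stalls):
--     n = len(stalls)
--     left = []
--     run = 0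
--     for b in stalls:
--         left.append(run)
--         run = 0 if b else run + 1
--     right = []
--     run = 0
--     for b in reversed(stalls):
--         right.append(run)
--         run = 0 if b else run + 1
--     right.reverse()
--     best = None
--     for i in range(n):
--         key = (0, 0) if stalls[i] else (min(left[i], right[i]), max(left[i], right[i]))
--         if best is None or key > best[1]:
--             best = (i, key)
--     i = best[0]
--     return (i, (0, 0) if stalls[i] else (left[i], right[i]))
-- ===== Notes on version B (the rewrite author's own statement) =====
-- stated objective: faster
-- what changed: A recomputes both empty-neighbour runs by scanning outward from every stall (quadratic) and then takes two max-filter passes; B precomputes left/right empty-run lengths in two linear passes and picks the first lexicographic (min,max)-argmax in one scan.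
import Mathlib
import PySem

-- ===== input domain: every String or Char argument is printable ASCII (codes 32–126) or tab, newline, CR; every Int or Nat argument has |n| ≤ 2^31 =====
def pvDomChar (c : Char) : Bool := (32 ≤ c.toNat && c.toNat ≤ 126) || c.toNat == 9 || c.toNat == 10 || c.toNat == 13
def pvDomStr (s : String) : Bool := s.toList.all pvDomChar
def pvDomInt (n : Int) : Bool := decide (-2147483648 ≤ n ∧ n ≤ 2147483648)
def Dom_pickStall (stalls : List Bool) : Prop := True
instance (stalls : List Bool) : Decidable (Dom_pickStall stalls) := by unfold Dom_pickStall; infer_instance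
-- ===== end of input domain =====

-- B replaces A's per-stall quadratic neighbour scans by two linear run-length passes and a
-- single lexicographic argmax scan (O(n) instead of O(n^2)); return values agree wherever A returns.

-- ===== PORT A =====
-- fueled transliteration of getSides' left while-loop; pyGet? = none models IndexError
-- (unreachable under Pre_pickStall, where the scan always meets an occupied stall first)
def pvLeftScanA (stalls : List Bool) : Nat → Int → Int → Int
  | 0, _, c => c
  | fuel+1, idx, c =>
    match PySem.List.pyGet? stalls idx with
    | none => c
    | some b => if b then c else pvLeftScanA stalls fuel (idx - 1) (c + 1)

-- fueled transliteration of getSides' right while-loop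
def pvRightScanA (stalls : List Bool) : Nat → Int → Int → Int
  | 0, _, c => c
  | fuel+1, idx, c =>
    match PySem.List.pyGet? stalls idx with
    | none => c
    | some b => if b then c else pvRightScanA stalls fuel (idx + 1) (c + 1)

def getSidesA (stalls : List Bool) (idx : Int) : Int × Int :=
  if (PySem.List.pyGet? stalls idx).getD false then (0, 0)
  else
    let left := pvLeftScanA stalls (2 * stalls.length + 2) (idx - 1) 0
    let right := pvRightScanA stalls (stalls.length + 2) (idx + 1) 0
    (left, right)

-- myMax: fold keeping the first maximum under func, then filter the equal-key elements
def myMaxA {α : Type} (l : List α) (f : α → Int) : List α :=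
  match l with
  | [] => []   -- next() on an empty iterator raises StopIteration; unreachable under Pre_pickStall
  | x :: xs =>
    let currMax := xs.foldl (fun c n => if f c < f n then n else c) x
    l.filter (fun y => f y == f currMax)

def pickStall (stalls : List Bool) : Int × (Int × Int) :=
  let stallInfo := (PySem.List.pyRange 0 (PySem.List.len stalls) 1).map
    (fun i => (i, getSidesA stalls i))
  let mins := myMaxA stallInfo (fun x => min x.2.1 x.2.2)
  if mins.length == 1 then mins.headD (0, (0, 0))
  else (myMaxA mins (fun x => max x.2.1 x.2.2)).headD (0, (0, 0))

-- ===== PORT B =====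
-- one pass appending the running count of empty stalls seen since the last occupied one
def pvRuns (stalls : List Bool) : List Int :=
  (stalls.foldl (fun (acc : List Int × Int) b =>
    (acc.1 ++ [acc.2], if b then 0 else acc.2 + 1)) ([], 0)).1

-- Python tuple comparison `key > best[1]` on int pairs
def pvLexGt (a b : Int × Int) : Bool := a.1 > b.1 || (a.1 == b.1 && a.2 > b.2)

def pickStall_alt (stalls : List Bool) : Int × (Int × Int) :=
  let left := pvRuns stalls
  let right := (pvRuns stalls.reverse).reverse
  let best := (PySem.List.pyRange 0 (PySem.List.len stalls) 1).foldl
    (fun (best : Option (Int × (Int × Int))) i =>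
      let key := if PySem.List.pyGetD stalls i false then ((0 : Int), (0 : Int))
        else (min (PySem.List.pyGetD left i 0) (PySem.List.pyGetD right i 0),
              max (PySem.List.pyGetD left i 0) (PySem.List.pyGetD right i 0))
      match best with
      | none => some (i, key)
      | some c => if pvLexGt key c.2 then some (i, key) else best) none
  match best with
  | none => (0, (0, 0))  -- empty input: the Python B raises TypeError here; outside Pre_pickStall
  | some (i, _) =>
    (i, if PySem.List.pyGetD stalls i false then (0, 0)
        else (PySem.List.pyGetD left i 0, PySem.List.pyGetD right i 0))

-- ===== PRECONDITION & SPEC =====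
-- Pre_ excludes exactly the inputs on which A raises: the empty list (StopIteration) and lists
-- whose last stall is empty (the rightward scan runs off the end: IndexError).
def Pre_pickStall (stalls : List Bool) : Prop := stalls ≠ [] ∧ stalls.getLast? = some true
instance (stalls : List Bool) : Decidable (Pre_pickStall stalls) := by unfold Pre_pickStall; infer_instance
def pvWitness_pickStall : List Bool := [false, false, true]

def Spec_pickStall (stalls : List Bool) (out : Int × (Int × Int)) : Prop := out = pickStall_alt stalls
instance (stalls : List Bool) (out : Int × (Int × Int)) : Decidable (Spec_pickStall stalls out) := by unfold Spec_pickStall; infer_instance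

-- ===== CLAIM (what is proved, stated in full; the proofs are below) =====
def Claim_equal_pickStall : Prop := ∀ (stalls : List Bool), Dom_pickStall stalls → Pre_pickStall stalls → Spec_pickStall stalls (pickStall stalls)

-- ===== LEMMAS AND PROOFS =====
-- ===== specification-level run lengths =====
def pvL (s : List Bool) : Nat → Nat
  | 0 => 0
  | i+1 => if s.getD i false then 0 else pvL s i + 1

def pvRunFrom : List Bool → Nat
  | [] => 0
  | b :: t => if b then 0 else pvRunFrom t + 1

def pvR (s : List Bool) (i : Nat) : Nat := pvRunFrom (s.drop (i+1))

def pvSides (s : List Bool) (i : Nat) : Int × Int :=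
  if s.getD i false then (0, 0) else ((pvL s i : Int), (pvR s i : Int))

def pvKey (s : List Bool) (i : Nat) : Int × Int :=
  if s.getD i false then (0, 0)
  else (min (pvL s i : Int) (pvR s i : Int), max (pvL s i : Int) (pvR s i : Int))

-- ===== generic first-argmax fold =====
def pvArg {α β : Type} [LinearOrder β] (key : α → β) (c : α) (l : List α) : α :=
  l.foldl (fun c n => if key c < key n then n else c) c

theorem pvArg_nil {α β : Type} [LinearOrder β] (key : α → β) (c : α) : pvArg key c [] = c := rfl

theorem pvArg_cons {α β : Type} [LinearOrder β] (key : α → β) (c n : α) (l : List α) :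
    pvArg key c (n :: l) = pvArg key (if key c < key n then n else c) l := rfl

theorem pvArg_mem {α β : Type} [LinearOrder β] (key : α → β) (c : α) (l : List α) :
    pvArg key c l ∈ c :: l := by
  induction l generalizing c with
  | nil => simp [pvArg_nil]
  | cons n t ih =>
    rw [pvArg_cons]
    by_cases hcn : key c < key n
    · rw [if_pos hcn]
      rcases List.mem_cons.1 (ih n) with h | h <;> simp [h, List.mem_cons]
    · rw [if_neg hcn]
      rcases List.mem_cons.1 (ih c) with h | h <;> simp [h, List.mem_cons]

theorem pvArg_le {α β : Type} [LinearOrder β] (key : α → β) (c : α) (l : List α) :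
    ∀ y ∈ c :: l, key y ≤ key (pvArg key c l) := by
  induction l generalizing c with
  | nil => intro y hy; simp at hy; simp [pvArg_nil, hy]
  | cons n t ih =>
    intro y hy
    rw [pvArg_cons]
    have hc : key c ≤ key (if key c < key n then n else c) := by split <;> simp_all [le_of_lt]
    have hn : key n ≤ key (if key c < key n then n else c) := by split <;> simp_all [le_of_not_gt]
    rcases List.mem_cons.1 hy with rfl | hy
    · exact le_trans hc (ih _ _ (List.mem_cons_self))
    · rcases List.mem_cons.1 hy with rfl | hy
      · exact le_trans hn (ih _ _ (List.mem_cons_self))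
      · exact ih _ _ (List.mem_cons_of_mem _ hy)

theorem pvArg_find? {α β : Type} [LinearOrder β] (key : α → β) (c : α) (l : List α) :
    (c :: l).find? (fun y => decide (key y = key (pvArg key c l))) = some (pvArg key c l) := by
  induction l generalizing c with
  | nil => simp [pvArg_nil, List.find?]
  | cons n t ih =>
    rw [pvArg_cons]
    by_cases hcn : key c < key n
    · rw [if_pos hcn]
      have ha := pvArg_le key n t
      have hne : ¬ (key c = key (pvArg key n t)) := by
        intro h
        exact absurd (lt_of_lt_of_le hcn (ha n List.mem_cons_self)) (by rw [h]; exact lt_irrefl _)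
      rw [List.find?_cons_of_neg (by simpa using hne)]
      exact ih n
    · rw [if_neg hcn]
      have ihc := ih c
      by_cases hc : key c = key (pvArg key c t)
      · have : List.find? (fun y => decide (key y = key (pvArg key c t))) (c :: t) = some c := by
          rw [List.find?_cons_of_pos (by simpa using hc)]
        rw [this] at ihc
        have hca : c = pvArg key c t := by injection ihc
        rw [List.find?_cons_of_pos (by simpa using hc)]
        exact congrArg some hca
      · have ha := pvArg_le key c t
        have h2 : key c ≤ key (pvArg key c t) := ha c List.mem_cons_self
        have hnn : ¬ (key n = key (pvArg key c t)) := fun h =>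
          hc (le_antisymm h2 (h ▸ le_of_not_gt hcn))
        rw [List.find?_cons_of_neg (by simpa using hc), List.find?_cons_of_neg (by simpa using hnn)]
        rw [List.find?_cons_of_neg (by simpa using hc)] at ihc
        exact ihc

theorem pvArg_map {α γ β : Type} [LinearOrder β] (key : γ → β) (h : α → γ) (c : α) (l : List α) :
    pvArg key (h c) (l.map h) = h (pvArg (fun x => key (h x)) c l) := by
  induction l generalizing c with
  | nil => simp [pvArg_nil]
  | cons n t ih =>
    simp only [List.map_cons, pvArg_cons]
    by_cases hcn : key (h c) < key (h n)
    · rw [if_pos hcn, if_pos (by simpa using hcn), ih]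
    · rw [if_neg hcn, if_neg (by simpa using hcn), ih]

theorem pvArg_congr {α β : Type} [LinearOrder β] (key₁ key₂ : α → β) (c : α) (l : List α)
    (h : ∀ y ∈ c :: l, key₁ y = key₂ y) : pvArg key₁ c l = pvArg key₂ c l := by
  induction l generalizing c with
  | nil => simp [pvArg_nil]
  | cons n t ih =>
    have hc := h c List.mem_cons_self
    have hn := h n (by simp)
    rw [pvArg_cons, pvArg_cons, hc, hn]
    split
    · exact ih n (fun y hy => h y (by simp [List.mem_cons] at hy ⊢; tauto))
    · exact ih c (fun y hy => h y (by simp [List.mem_cons] at hy ⊢; tauto))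

theorem pvTwoStage {α : Type} (f g : α → Int) (x : α) (xs : List α) (d : α) :
    (if (myMaxA (x :: xs) f).length == 1 then (myMaxA (x :: xs) f).headD d
     else (myMaxA (myMaxA (x :: xs) f) g).headD d)
    = pvArg (fun y => toLex (f y, g y)) x xs := by
  set K : α → Lex (Int × Int) := fun y => toLex (f y, g y) with hKdef
  set a := pvArg K x xs with ha
  have haMem : a ∈ x :: xs := pvArg_mem K x xs
  have haLe : ∀ y ∈ x :: xs, K y ≤ K a := pvArg_le K x xs
  have hfc1 : f (pvArg f x xs) = f a := by
    have h1 : f (pvArg f x xs) ≤ f a := by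
      rcases Prod.Lex.le_iff.1 (haLe _ (pvArg_mem f x xs)) with h | ⟨h, _⟩
      · exact le_of_lt h
      · exact le_of_eq h
    exact le_antisymm h1 (pvArg_le f x xs a haMem)
  have hmins : myMaxA (x :: xs) f = (x :: xs).filter (fun y => f y == f a) := by
    show (x :: xs).filter (fun y => f y == f (pvArg f x xs)) = _
    rw [hfc1]
  have haInMins : a ∈ (x :: xs).filter (fun y => f y == f a) :=
    List.mem_filter.2 ⟨haMem, by simp⟩
  rw [hmins]
  by_cases hlen : ((x :: xs).filter (fun y => f y == f a)).length = 1
  · obtain ⟨y, hy⟩ := List.length_eq_one_iff.1 hlen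
    rw [hy] at haInMins ⊢
    simp at haInMins ⊢
    exact haInMins.symm
  · rw [if_neg (by simpa using hlen)]
    rcases hm : (x :: xs).filter (fun y => f y == f a) with _ | ⟨m0, mt⟩
    · rw [hm] at haInMins; simp at haInMins
    · rw [hm] at haInMins
      have hstage2 : myMaxA (m0 :: mt) g = (m0 :: mt).filter (fun y => g y == g (pvArg g m0 mt)) := rfl
      set c2 := pvArg g m0 mt with hc2
      have hc2Mins : c2 ∈ (x :: xs).filter (fun y => f y == f a) := by
        rw [hm]; exact pvArg_mem g m0 mt
      have hfc2 : f c2 = f a := by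
        have := (List.mem_filter.1 hc2Mins).2; simpa using this
      have hgc2 : g c2 = g a := by
        have h1 : g c2 ≤ g a := by
          rcases Prod.Lex.le_iff.1 (haLe c2 (List.mem_filter.1 hc2Mins).1) with h | ⟨_, h⟩
          · exact absurd hfc2 (ne_of_lt h)
          · exact h
        exact le_antisymm h1 (pvArg_le g m0 mt a haInMins)
      rw [hstage2, hgc2, ← hm, List.filter_filter]
      have hpred : (fun y => (g y == g a) && (f y == f a)) = (fun y => decide (K y = K a)) := by
        funext y
        simp only [hKdef, toLex_inj, Prod.mk.injEq, Bool.decide_and]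
        rw [Bool.and_comm]
        apply Bool.eq_iff_iff.mpr
        simp
      rw [List.headD_eq_head?_getD, List.head?_filter, hpred, pvArg_find? K x xs]
      rfl

theorem pvL_le (s : List Bool) (i : Nat) : pvL s i ≤ i := by
  induction i with
  | zero => simp [pvL]
  | succ i ih => rw [pvL]; split <;> omega

theorem pvL_false (s : List Bool) (i : Nat) :
    ∀ m, m < pvL s i → s.getD (i - 1 - m) false = false := by
  induction i with
  | zero => intro m hm; simp [pvL] at hm
  | succ i ih =>
    intro m hm
    rw [pvL] at hm
    by_cases hb : s.getD i false
    · rw [if_pos hb] at hm; omega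
    · rw [if_neg hb] at hm
      cases m with
      | zero => simpa using hb
      | succ m =>
        have h := ih m (by omega)
        have hidx : i + 1 - 1 - (m + 1) = i - 1 - m := by omega
        rw [hidx]; exact h

theorem pvL_true (s : List Bool) (i : Nat) (h : pvL s i < i) :
    s.getD (i - 1 - pvL s i) false = true := by
  induction i with
  | zero => simp [pvL] at h
  | succ i ih =>
    by_cases hb : s.getD i false
    · have h0 : pvL s (i + 1) = 0 := by rw [pvL, if_pos hb]
      rw [h0]; simpa using hb
    · have h0 : pvL s (i + 1) = pvL s i + 1 := by rw [pvL, if_neg hb]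
      rw [h0] at h ⊢
      have hidx : i + 1 - 1 - (pvL s i + 1) = i - 1 - pvL s i := by omega
      rw [hidx]
      exact ih (by omega)

theorem pvRunFrom_spec (t : List Bool) (hlast : t.getLast? = some true) :
    pvRunFrom t < t.length ∧ (∀ m, m < pvRunFrom t → t.getD m false = false) ∧
      t.getD (pvRunFrom t) false = true := by
  induction t with
  | nil => simp at hlast
  | cons b t' ih =>
    by_cases hb : b
    · subst hb
      refine ⟨by simp [pvRunFrom], ?_, by simp [pvRunFrom]⟩
      intro m hm; simp [pvRunFrom] at hm
    · have hb' : b = false := by simpa using hb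
      subst hb'
      cases t' with
      | nil => simp at hlast
      | cons c tt =>
        have hlast' : (c :: tt).getLast? = some true := by
          rwa [List.getLast?_cons_cons] at hlast
        obtain ⟨h1, h2, h3⟩ := ih hlast'
        have hr : pvRunFrom (false :: c :: tt) = pvRunFrom (c :: tt) + 1 := by
          simp [pvRunFrom]
        refine ⟨by rw [hr, List.length_cons]; exact Nat.succ_lt_succ h1, ?_, by simp [hr]; exact h3⟩
        intro m hm
        rw [hr] at hm
        cases m with
        | zero => simp
        | succ m => simpa using h2 m (by omega)

theorem pvLeftScanA_eq (s : List Bool) (k : Nat) :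
    ∀ (fuel : Nat) (idx c : Int), k < fuel →
    (∀ m : Nat, m < k → PySem.List.pyGet? s (idx - m) = some false) →
    PySem.List.pyGet? s (idx - k) = some true →
    pvLeftScanA s fuel idx c = c + k := by
  induction k with
  | zero =>
    intro fuel idx c hf _ htrue
    obtain ⟨f, rfl⟩ : ∃ f, fuel = f + 1 := ⟨fuel - 1, by omega⟩
    simp only [Int.natCast_zero, sub_zero] at htrue
    simp [pvLeftScanA, htrue]
  | succ k ih =>
    intro fuel idx c hf hfalse htrue
    obtain ⟨f, rfl⟩ : ∃ f, fuel = f + 1 := ⟨fuel - 1, by omega⟩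
    have h0 : PySem.List.pyGet? s idx = some false := by
      have := hfalse 0 (by omega); simpa using this
    have hrec : pvLeftScanA s (f + 1) idx c = pvLeftScanA s f (idx - 1) (c + 1) := by
      simp [pvLeftScanA, h0]
    rw [hrec, ih f (idx - 1) (c + 1) (by omega)
      (fun m hm => by
        have := hfalse (m + 1) (by omega)
        have hidx : idx - ((m + 1 : Nat) : Int) = idx - 1 - m := by push_cast; ring
        rwa [hidx] at this)
      (by
        have hidx : idx - ((k + 1 : Nat) : Int) = idx - 1 - k := by push_cast; ring
        rwa [hidx] at htrue)]
    push_cast; ring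

theorem pvRightScanA_eq (s : List Bool) (k : Nat) :
    ∀ (fuel : Nat) (idx c : Int), k < fuel →
    (∀ m : Nat, m < k → PySem.List.pyGet? s (idx + m) = some false) →
    PySem.List.pyGet? s (idx + k) = some true →
    pvRightScanA s fuel idx c = c + k := by
  induction k with
  | zero =>
    intro fuel idx c hf _ htrue
    obtain ⟨f, rfl⟩ : ∃ f, fuel = f + 1 := ⟨fuel - 1, by omega⟩
    simp only [Int.natCast_zero, add_zero] at htrue
    simp [pvRightScanA, htrue]
  | succ k ih =>
    intro fuel idx c hf hfalse htrue
    obtain ⟨f, rfl⟩ : ∃ f, fuel = f + 1 := ⟨fuel - 1, by omega⟩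
    have h0 : PySem.List.pyGet? s idx = some false := by
      have := hfalse 0 (by omega); simpa using this
    have hrec : pvRightScanA s (f + 1) idx c = pvRightScanA s f (idx + 1) (c + 1) := by
      simp [pvRightScanA, h0]
    rw [hrec, ih f (idx + 1) (c + 1) (by omega)
      (fun m hm => by
        have := hfalse (m + 1) (by omega)
        have hidx : idx + ((m + 1 : Nat) : Int) = idx + 1 + m := by push_cast; ring
        rwa [hidx] at this)
      (by
        have hidx : idx + ((k + 1 : Nat) : Int) = idx + 1 + k := by push_cast; ring
        rwa [hidx] at htrue)]
    push_cast; ring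

theorem pvGetn (s : List Bool) (n : Nat) (h : n < s.length) :
    PySem.List.pyGet? s (n : Int) = some (s.getD n false) := by
  rw [PySem.List.pyGet?_natCast, List.getElem?_eq_getElem h,
    List.getD_eq_getElem?_getD, List.getElem?_eq_getElem h]
  rfl

theorem pvGetD_eq (s : List Bool) (n : Nat) (h : n < s.length) : s.getD n false = s[n] := by
  rw [List.getD_eq_getElem?_getD, List.getElem?_eq_getElem h]; rfl

theorem getSidesA_eq (s : List Bool) (hlast : s.getLast? = some true) (i : Nat)
    (hi : i < s.length) : getSidesA s (i : Int) = pvSides s i := by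
  have hget : PySem.List.pyGet? s (i : Int) = some (s.getD i false) := pvGetn s i hi
  by_cases hb : s.getD i false
  · simp only [getSidesA, pvSides]
    rw [hget]
    simp [hb, -List.getD_eq_getElem?_getD]
  · have hbf : s.getD i false = false := by simpa using hb
    have hL : pvLeftScanA s (2 * s.length + 2) ((i : Int) - 1) 0 = (pvL s i : Int) := by
      have hle := pvL_le s i
      rcases lt_or_eq_of_le hle with hlt | heq
      · rw [pvLeftScanA_eq s (pvL s i) _ _ 0 (by omega)
          (fun m hm => by
            have hidx : (i : Int) - 1 - m = ((i - 1 - m : Nat) : Int) := by omega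
            rw [hidx, pvGetn s _ (by omega), pvL_false s i m hm])
          (by
            have hidx : (i : Int) - 1 - (pvL s i) = ((i - 1 - pvL s i : Nat) : Int) := by omega
            rw [hidx, pvGetn s _ (by omega), pvL_true s i hlt])]
        ring
      · rw [pvLeftScanA_eq s (pvL s i) _ _ 0 (by omega)
          (fun m hm => by
            have hidx : (i : Int) - 1 - m = ((i - 1 - m : Nat) : Int) := by omega
            rw [hidx, pvGetn s _ (by omega), pvL_false s i m hm])
          (by
            have hidx : (i : Int) - 1 - (pvL s i) = -1 := by omega
            rw [hidx, PySem.List.pyGet?_neg_one, hlast])]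
        ring
    have hi1 : i + 1 < s.length := by
      rcases lt_or_eq_of_le (Nat.succ_le_of_lt hi) with h | h
      · exact h
      · exfalso
        have : s.getLast? = s[i]? := by
          rw [List.getLast?_eq_getElem?]; congr 1; omega
        rw [this, List.getElem?_eq_getElem hi] at hlast
        have : s[i] = true := by injection hlast
        rw [pvGetD_eq s i hi] at hbf
        rw [this] at hbf; simp at hbf
    have hlastt : (s.drop (i + 1)).getLast? = some true := by
      rw [List.getLast?_drop, if_neg (by omega)]; exact hlast
    obtain ⟨h1, h2, h3⟩ := pvRunFrom_spec (s.drop (i + 1)) hlastt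
    have hlen : (s.drop (i + 1)).length = s.length - (i + 1) := by simp
    have hdropD : ∀ m : Nat, (s.drop (i + 1)).getD m false = s.getD (i + 1 + m) false := by
      intro m
      rw [List.getD_eq_getElem?_getD, List.getD_eq_getElem?_getD, List.getElem?_drop]
    have hR : pvRightScanA s (s.length + 2) ((i : Int) + 1) 0 = (pvR s i : Int) := by
      rw [pvRightScanA_eq s (pvR s i) _ _ 0 (by unfold pvR; omega)
        (fun m hm => by
          have hmlt : i + 1 + m < s.length := by unfold pvR at hm; omega
          have hidx : (i : Int) + 1 + m = ((i + 1 + m : Nat) : Int) := by omega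
          rw [hidx, pvGetn s _ hmlt, ← hdropD, h2 m hm])
        (by
          have hklt : i + 1 + pvR s i < s.length := by unfold pvR at *; omega
          have hidx : (i : Int) + 1 + (pvR s i) = ((i + 1 + pvR s i : Nat) : Int) := by omega
          rw [hidx, pvGetn s _ hklt, ← hdropD]
          unfold pvR; rw [h3])]
      ring
    simp only [getSidesA, pvSides]
    rw [hget]
    simp only [Option.getD_some, hbf, Bool.false_eq_true, if_false]
    rw [hL, hR]

theorem pvRuns_aux (s : List Bool) : ∀ (k m : Nat) (acc : List Int), m + k = s.length →
    (List.foldl (fun (acc : List Int × Int) b => (acc.1 ++ [acc.2], if b then 0 else acc.2 + 1))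
      (acc, (pvL s m : Int)) (s.drop m)).1
    = acc ++ (List.range' m k).map (fun i => (pvL s i : Int)) := by
  intro k
  induction k with
  | zero => intro m acc h; rw [List.drop_of_length_le (by omega)]; simp
  | succ k ih =>
    intro m acc h
    rw [List.drop_eq_getElem_cons (by omega : m < s.length)]
    simp only [List.foldl_cons]
    have hstep : (if s[m] then (0 : Int) else (pvL s m : Int) + 1) = (pvL s (m + 1) : Int) := by
      rw [pvL, pvGetD_eq s m (by omega)]
      split <;> simp
    rw [hstep, ih (m + 1) _ (by omega), List.range'_succ]
    simp

theorem pvRuns_eq (s : List Bool) :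
    pvRuns s = (List.range s.length).map (fun i => (pvL s i : Int)) := by
  have h := pvRuns_aux s s.length 0 [] (by omega)
  simp only [List.drop_zero, List.nil_append] at h
  rw [pvRuns]
  rw [show ((List.nil : List Int), (0 : Int)) = (([] : List Int), ((pvL s 0 : Nat) : Int)) by rfl] at *
  rw [show (List.range' 0 s.length) = List.range s.length from (List.range_eq_range' ..).symm] at h
  exact h

theorem pvRuns_getD (s : List Bool) (i : Nat) (hi : i < s.length) :
    (pvRuns s).getD i 0 = (pvL s i : Int) := by
  rw [pvRuns_eq, List.getD_eq_getElem?_getD, List.getElem?_map, List.getElem?_range hi]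
  rfl

theorem pvL_eq_runFrom (t : List Bool) : ∀ j, j ≤ t.length →
    pvL t j = pvRunFrom ((t.take j).reverse) := by
  intro j
  induction j with
  | zero => intro _; simp [pvL, pvRunFrom]
  | succ j ih =>
    intro hj
    have hjl : j < t.length := by omega
    rw [pvL, List.take_add_one, List.getElem?_eq_getElem hjl]
    simp only [Option.toList_some, List.reverse_append, List.reverse_cons, List.reverse_nil,
      List.nil_append, List.singleton_append]
    rw [pvRunFrom, pvGetD_eq t j hjl, ih (by omega)]

theorem pvL_reverse (s : List Bool) (i : Nat) (hi : i < s.length) :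
    pvL s.reverse (s.length - 1 - i) = pvR s i := by
  rw [pvL_eq_runFrom s.reverse _ (by simp; omega)]
  rw [List.take_reverse]
  have h1 : s.length - (s.length - 1 - i) = i + 1 := by omega
  rw [h1, List.reverse_reverse]
  rfl

theorem pvRight_getD (s : List Bool) (i : Nat) (hi : i < s.length) :
    ((pvRuns s.reverse).reverse).getD i 0 = (pvR s i : Int) := by
  rw [pvRuns_eq, List.getD_eq_getElem?_getD]
  have hlen : ((List.range s.reverse.length).map (fun i => (pvL s.reverse i : Int))).length = s.length := by
    simp
  rw [List.getElem?_reverse (by rw [hlen]; exact hi), hlen]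
  rw [List.getElem?_map, List.getElem?_range (by simp; omega)]
  simp only [Option.map_some, Option.getD_some]
  rw [show s.reverse.length = s.length by simp] at *
  rw [pvL_reverse s _ hi]

theorem pvLexGt_iff (a b : Int × Int) : pvLexGt a b = true ↔ toLex b < toLex a := by
  rw [Prod.Lex.lt_iff]
  simp only [pvLexGt, Bool.or_eq_true, Bool.and_eq_true, decide_eq_true_eq, beq_iff_eq,
    gt_iff_lt]
  constructor
  · rintro (h | ⟨h1, h2⟩)
    · exact Or.inl h
    · exact Or.inr ⟨h1.symm, h2⟩
  · rintro (h | ⟨h1, h2⟩)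
    · exact Or.inl h
    · exact Or.inr ⟨h1.symm, h2⟩

theorem pvRange_eq (s : List Bool) :
    PySem.List.pyRange 0 (PySem.List.len s) 1 = (List.range s.length).map (fun k : Nat => (k : Int)) := by
  rw [PySem.List.pyRange_one]
  simp

theorem pvBFold (keyf : Int → Int × Int) :
    ∀ (l : List Int) (c : Int),
    List.foldl (fun (best : Option (Int × (Int × Int))) i =>
        match best with
        | none => some (i, keyf i)
        | some c => if pvLexGt (keyf i) c.2 then some (i, keyf i) else some c)
      (some (c, keyf c)) l
    = some (pvArg (fun i => toLex (keyf i)) c l, keyf (pvArg (fun i => toLex (keyf i)) c l)) := by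
  intro l
  induction l with
  | nil => intro c; simp [pvArg_nil]
  | cons n t ih =>
    intro c
    simp only [List.foldl_cons]
    rw [pvArg_cons]
    by_cases h : toLex (keyf c) < toLex (keyf n)
    · rw [if_pos ((pvLexGt_iff _ _).2 h), if_pos h]
      exact ih n
    · rw [if_neg (fun hc => h ((pvLexGt_iff _ _).1 hc)), if_neg h]
      exact ih c

theorem pvMain (s : List Bool) (hne : s ≠ []) (hlast : s.getLast? = some true) :
    pickStall s = pickStall_alt s := by
  obtain ⟨m, hm⟩ : ∃ m, s.length = m + 1 := by
    cases s with
    | nil => simp at hne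
    | cons a t => exact ⟨t.length, by simp⟩
  have hrange : List.range s.length = 0 :: (List.range m).map Nat.succ := by
    rw [hm, List.range_succ_eq_map]
  set l' : List Nat := (List.range m).map Nat.succ with hl'
  have hmem : ∀ k ∈ (0 : Nat) :: l', k < s.length := by
    intro k hk
    have : k ∈ List.range s.length := by rw [hrange]; exact hk
    simpa using this
  set KN : Nat → Lex (Int × Int) := fun k => toLex (pvKey s k) with hKN
  set j : Nat := pvArg KN 0 l' with hj
  have hjlt : j < s.length := hmem j (pvArg_mem KN 0 l')
  -- ===== A side =====
  have hA : pickStall s = ((j : Int), pvSides s j) := by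
    unfold pickStall
    simp only [pvRange_eq, hrange, List.map_map, List.map_cons]
    rw [pvTwoStage]
    refine Eq.trans (pvArg_map _ ((fun i => (i, getSidesA s i)) ∘ fun k : Nat => (k : Int)) 0 l') ?_
    rw [pvArg_congr _ KN 0 l' (fun k hk => by
      have hk' := hmem k hk
      show toLex (min (getSidesA s (k : Int)).1 (getSidesA s (k : Int)).2,
        max (getSidesA s (k : Int)).1 (getSidesA s (k : Int)).2) = toLex (pvKey s k)
      rw [getSidesA_eq s hlast k hk']
      unfold pvSides pvKey
      by_cases hb : s[k]?.getD false <;> simp [hb])]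
    show ((j : Int), getSidesA s (j : Int)) = _
    rw [getSidesA_eq s hlast j hjlt]
  -- ===== B side =====
  have hB : pickStall_alt s = ((j : Int), pvSides s j) := by
    unfold pickStall_alt
    simp only [pvRange_eq, hrange, List.map_cons, List.foldl_cons]
    have hkey : ∀ i : Int, 0 ≤ i → i < (s.length : Int) →
        (if PySem.List.pyGetD s i false = true then ((0 : Int), (0 : Int))
         else (min (PySem.List.pyGetD (pvRuns s) i 0) (PySem.List.pyGetD (pvRuns s.reverse).reverse i 0),
               max (PySem.List.pyGetD (pvRuns s) i 0) (PySem.List.pyGetD (pvRuns s.reverse).reverse i 0)))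
        = pvKey s i.toNat := by
      intro i h0 hlt
      obtain ⟨k, rfl⟩ : ∃ k : Nat, i = (k : Int) := ⟨i.toNat, (Int.toNat_of_nonneg h0).symm⟩
      have hk : k < s.length := by omega
      rw [PySem.List.pyGetD_natCast, PySem.List.pyGetD_natCast, PySem.List.pyGetD_natCast,
        pvRuns_getD s k hk, pvRight_getD s k hk, Int.toNat_natCast]
      rfl
    rw [hkey ((0 : Nat) : Int) (by simp) (by omega)]
    rw [PySem.List.foldl_congr_mem (List.map (fun k : Nat => (k : Int)) l') _
      (fun (best : Option (Int × (Int × Int))) (i : Int) =>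
        match best with
        | none => some (i, pvKey s i.toNat)
        | some c => if pvLexGt (pvKey s i.toNat) c.2 then some (i, pvKey s i.toNat) else some c)
      (some (((0 : Nat) : Int), pvKey s ((0 : Nat) : Int).toNat))
      (by
        intro acc x hx
        obtain ⟨k, hk, rfl⟩ : ∃ k : Nat, k ∈ l' ∧ x = (k : Int) := by
          obtain ⟨k, hk, rfl⟩ := List.mem_map.1 hx
          exact ⟨k, hk, rfl⟩
        have hklt : k < s.length := hmem k (List.mem_cons_of_mem _ hk)
        cases acc with
        | none => rw [hkey (k : Int) (by omega) (by omega)]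
        | some c => rw [hkey (k : Int) (by omega) (by omega)])]
    rw [pvBFold (fun i : Int => pvKey s i.toNat) (List.map (fun k : Nat => (k : Int)) l') ((0 : Nat) : Int)]
    have hfold : pvArg (fun i : Int => toLex (pvKey s i.toNat)) ((0 : Nat) : Int)
        (List.map (fun k : Nat => (k : Int)) l') = ((j : Nat) : Int) := by
      refine Eq.trans (pvArg_map _ (fun k : Nat => (k : Int)) 0 l') ?_
      rw [pvArg_congr _ KN 0 l' (fun k hk => by
        show toLex (pvKey s ((k : Int)).toNat) = toLex (pvKey s k)
        rw [Int.toNat_natCast])]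
    rw [hfold]
    show ((j : Int), if PySem.List.pyGetD s (j : Int) false = true then ((0 : Int), (0 : Int))
      else (PySem.List.pyGetD (pvRuns s) (j : Int) 0,
            PySem.List.pyGetD (pvRuns s.reverse).reverse (j : Int) 0)) = _
    rw [PySem.List.pyGetD_natCast, PySem.List.pyGetD_natCast, PySem.List.pyGetD_natCast,
      pvRuns_getD s j hjlt, pvRight_getD s j hjlt]
    rfl
  rw [hA, hB]

-- ===== VERDICT (by name: the statement is the Claim_ definition above) =====
theorem pickStall_spec : Claim_equal_pickStall := by
  intro s _ hPre
  unfold Spec_pickStall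
  exact pvMain s hPre.1 hPre.2
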